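-- pv_equiv track=rewrite | github.com/Phani-LP/Flames-Game-with-GUI | Flames with GUI.py | flames_count
-- ===== SOURCE A (Python) =====
-- def flames_count(name1, name2):
--     name1 = name1.lower().replace(" ", "")
--     name2 = name2.lower().replace(" ", "")
--
--     count1 = {char: name1.count(char) for char in set(name1)}
--     count2 = {char: name2.count(char) for char in set(name2)}
--
--     total_count = sum(count1.values()) + sum(count2.values())
--     common_count = sum(min(count1.get(char, 0), count2.get(char, 0)) for char in set(name1) | set(name2))
--     remaining_count = total_count - (2 * common_count)
--
--     return remaining_count
-- ===== SOURCE B (Python) =====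
-- def flames_count(name1, name2):
--     # One signed-count dict built in a single pass over each cleaned name;
--     # the answer is the sum of absolute deltas (multiset symmetric difference size).
--     name1 = name1.lower().replace(" ", "")
--     name2 = name2.lower().replace(" ", "")
--     delta = {}
--     for ch in name1:
--         delta[ch] = delta.get(ch, 0) + 1
--     for ch in name2:
--         delta[ch] = delta.get(ch, 0) - 1
--     return sum(abs(v) for v in delta.values())
-- ===== Notes on version B (the rewrite author's own statement) =====
-- stated objective: simpler
-- what changed: B replaces A's two per-distinct-char frequency dicts (each entry a full .count scan) plus a min-over-union loop and the total-minus-2*common arithmetic by one signed-count dict filled in a single pass over each name, returning the sum of absolute deltas.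
import Mathlib
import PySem

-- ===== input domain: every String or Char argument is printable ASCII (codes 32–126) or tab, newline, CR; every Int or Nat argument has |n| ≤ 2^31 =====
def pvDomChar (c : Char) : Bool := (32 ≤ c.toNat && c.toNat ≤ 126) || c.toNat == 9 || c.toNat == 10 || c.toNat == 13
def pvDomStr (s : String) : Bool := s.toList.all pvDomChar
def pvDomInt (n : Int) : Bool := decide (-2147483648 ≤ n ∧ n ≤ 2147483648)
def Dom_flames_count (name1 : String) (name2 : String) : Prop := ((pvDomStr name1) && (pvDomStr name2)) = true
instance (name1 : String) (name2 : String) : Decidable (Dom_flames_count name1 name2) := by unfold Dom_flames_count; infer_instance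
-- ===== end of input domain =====

-- B replaces A's two per-distinct-char frequency dicts and min-over-union loop by one
-- signed-count dict filled in a single pass, summing absolute deltas (simpler).

-- ===== PORT A =====
-- A's dict comprehensions iterate set(name); the dicts are only looked up / summed
-- afterwards and the sums are order-independent, so the set's iteration order is immaterial.
def flames_count (name1 : String) (name2 : String) : Int :=
  let n1 := (PySem.Str.replace (PySem.Str.lower name1) " " "").toList
  let n2 := (PySem.Str.replace (PySem.Str.lower name2) " " "").toList
  let s1 : PySem.Set Char := PySem.Set.ofList n1
  let s2 : PySem.Set Char := PySem.Set.ofList n2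
  let count1 : PySem.Dict Char Int :=
    s1.foldl (fun d c => d.insert c ((PySem.Chars.count n1 [c] : Nat) : Int)) PySem.Dict.empty
  let count2 : PySem.Dict Char Int :=
    s2.foldl (fun d c => d.insert c ((PySem.Chars.count n2 [c] : Nat) : Int)) PySem.Dict.empty
  let total_count := count1.values.sum + count2.values.sum
  let common_count :=
    ((PySem.Set.union s1 s2).map (fun c => min (count1.getD c 0) (count2.getD c 0))).sum
  total_count - 2 * common_count

-- ===== PORT B =====
def flames_count_alt (name1 : String) (name2 : String) : Int :=
  let n1 := (PySem.Str.replace (PySem.Str.lower name1) " " "").toList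
  let n2 := (PySem.Str.replace (PySem.Str.lower name2) " " "").toList
  let d1 := n1.foldl (fun d c => d.insert c (d.getD c 0 + 1)) (PySem.Dict.empty : PySem.Dict Char Int)
  let d2 := n2.foldl (fun d c => d.insert c (d.getD c 0 - 1)) d1
  (d2.values.map (fun v => |v|)).sum

-- ===== PRECONDITION & SPEC =====
def Spec_flames_count (name1 : String) (name2 : String) (out : Int) : Prop := out = flames_count_alt name1 name2
instance (name1 : String) (name2 : String) (out : Int) : Decidable (Spec_flames_count name1 name2 out) := by unfold Spec_flames_count; infer_instance

-- ===== CLAIM (what is proved, stated in full; the proofs are below) =====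
def Claim_equal_flames_count : Prop := ∀ (name1 : String) (name2 : String), Dom_flames_count name1 name2 → Spec_flames_count name1 name2 (flames_count name1 name2)

-- ===== LEMMAS AND PROOFS =====

-- str.count of a single-character needle is the character count
theorem pv_go_single (c : Char) : ∀ (fuel : Nat) (l : List Char) (acc : Nat), l.length ≤ fuel →
    PySem.Chars.count.go [c] fuel l acc = acc + l.count c := by
  intro fuel
  induction fuel with
  | zero =>
    intro l acc h
    have : l = [] := List.length_eq_zero_iff.mp (Nat.le_zero.mp h)
    subst this; simp [PySem.Chars.count.go]
  | succ n ih =>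
    intro l acc h
    cases l with
    | nil => simp [PySem.Chars.count.go]
    | cons x t =>
      have hlen : t.length ≤ n := by simpa using h
      by_cases hc : c = x
      · subst hc
        have hpre : [c].isPrefixOf (c :: t) = true := by simp [List.isPrefixOf]
        simp only [PySem.Chars.count.go, hpre, if_true, List.length_cons,
          List.drop_succ_cons]
        simp only [List.length_nil, List.drop_zero]
        rw [ih t (acc + 1) hlen]
        simp
        omega
      · have hpre : [c].isPrefixOf (x :: t) = false := by simp [List.isPrefixOf, hc]
        simp only [PySem.Chars.count.go, hpre, Bool.false_eq_true, if_false]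
        rw [ih t acc hlen]
        simp [Ne.symm hc]

theorem pv_count_single (l : List Char) (c : Char) : PySem.Chars.count l [c] = l.count c := by
  simp [PySem.Chars.count, pv_go_single c l.length l 0 le_rfl]

-- lookup in the dict {c ↦ f c | c ∈ S} built by inserting along a nodup list S
theorem pv_mapdict_eq_mk (S : List Char) (f : Char → Int) (h : S.Nodup) :
    S.foldl (fun d c => d.insert c (f c)) PySem.Dict.empty
      = PySem.Dict.mk (S.map fun c => (c, f c)) := by
  apply PySem.Dict.ext
  have := PySem.Dict.items_foldl_insert_fresh (ν := Int) S (fun c => c) f PySem.Dict.empty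
    (fun a _ => rfl) (by simpa using h)
  simpa using this

theorem pv_getD_mk (S : List Char) (f : Char → Int) (x : Char) :
    (PySem.Dict.mk (S.map fun c => (c, f c))).getD x 0 = if x ∈ S then f x else 0 := by
  induction S with
  | nil => simp [PySem.Dict.getD, PySem.Dict.get?]
  | cons c rest ih =>
    simp only [List.map_cons]
    by_cases hc : c = x
    · subst hc; simp [PySem.Dict.getD, PySem.Dict.get?_mk_cons]
    · have : (c == x) = false := by simpa using hc
      simp only [PySem.Dict.getD, PySem.Dict.get?_mk_cons, this, Bool.false_eq_true, if_false,
        List.mem_cons]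
      simpa [PySem.Dict.getD, Ne.symm hc] using ih

theorem pv_getD_mapdict (S : List Char) (f : Char → Int) (x : Char) (h : S.Nodup) :
    (S.foldl (fun d c => d.insert c (f c)) PySem.Dict.empty).getD x 0
      = if x ∈ S then f x else 0 := by
  rw [pv_mapdict_eq_mk S f h, pv_getD_mk]

-- values of that dict
theorem pv_values_mapdict (S : List Char) (f : Char → Int) (h : S.Nodup) :
    (S.foldl (fun d c => d.insert c (f c)) PySem.Dict.empty).values = S.map f := by
  rw [pv_mapdict_eq_mk S f h]
  simp [PySem.Dict.values]

-- decrementing counter loop (the +1 twin is PySem.Dict.getD_foldl_insert_add_one)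
theorem pv_getD_foldl_insert_sub_one (l : List Char) (d : PySem.Dict Char Int) (v : Char) :
    (l.foldl (fun d c => d.insert c (d.getD c 0 - 1)) d).getD v 0 = d.getD v 0 - l.count v := by
  induction l generalizing d with
  | nil => simp
  | cons x t ih =>
    simp only [List.foldl_cons, ih, List.count_cons]
    by_cases hx : v = x
    · subst hx; simp [PySem.Dict.getD_insert_self]; omega
    · rw [PySem.Dict.getD_insert_of_ne _ _ _ hx]
      simp [Ne.symm hx]

theorem pv_abs_eq (a b : Nat) :
    ((a : Int) + b) - 2 * min (a : Int) (b : Int) = |(a : Int) - b| := by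
  rcases abs_cases ((a : Int) - b) with ⟨h1, _⟩ | ⟨h1, _⟩ <;> omega

-- the heart: both formulas over the cleaned character lists agree
theorem pv_main (l1 l2 : List Char) :
    ((PySem.Set.ofList l1).foldl
        (fun d c => d.insert c ((PySem.Chars.count l1 [c] : Nat) : Int)) PySem.Dict.empty).values.sum
      + ((PySem.Set.ofList l2).foldl
        (fun d c => d.insert c ((PySem.Chars.count l2 [c] : Nat) : Int)) PySem.Dict.empty).values.sum
      - 2 * ((PySem.Set.union (PySem.Set.ofList l1) (PySem.Set.ofList l2)).map
          (fun c => min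
            (((PySem.Set.ofList l1).foldl
              (fun d c => d.insert c ((PySem.Chars.count l1 [c] : Nat) : Int)) PySem.Dict.empty).getD c 0)
            (((PySem.Set.ofList l2).foldl
              (fun d c => d.insert c ((PySem.Chars.count l2 [c] : Nat) : Int)) PySem.Dict.empty).getD c 0))).sum
    = ((l2.foldl (fun d c => d.insert c (d.getD c 0 - 1))
          (l1.foldl (fun d c => d.insert c (d.getD c 0 + 1))
            (PySem.Dict.empty : PySem.Dict Char Int))).values.map (fun v => |v|)).sum := by
  have hn1 : (PySem.Set.ofList l1).Nodup := PySem.Set.nodup_ofList l1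
  have hn2 : (PySem.Set.ofList l2).Nodup := PySem.Set.nodup_ofList l2
  -- A-side lookups are just character counts
  have hF : ∀ x, ((PySem.Set.ofList l1).foldl
      (fun d c => d.insert c ((PySem.Chars.count l1 [c] : Nat) : Int)) PySem.Dict.empty).getD x 0
      = (l1.count x : Int) := by
    intro x
    rw [pv_getD_mapdict _ _ _ hn1]
    split_ifs with h
    · rw [pv_count_single]
    · rw [List.count_eq_zero_of_not_mem (by simpa [PySem.Set.mem_ofList] using h)]; simp
  have hG : ∀ x, ((PySem.Set.ofList l2).foldl
      (fun d c => d.insert c ((PySem.Chars.count l2 [c] : Nat) : Int)) PySem.Dict.empty).getD x 0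
      = (l2.count x : Int) := by
    intro x
    rw [pv_getD_mapdict _ _ _ hn2]
    split_ifs with h
    · rw [pv_count_single]
    · rw [List.count_eq_zero_of_not_mem (by simpa [PySem.Set.mem_ofList] using h)]; simp
  -- B-side lookups are count differences
  have hD : ∀ x, (l2.foldl (fun d c => d.insert c (d.getD c 0 - 1))
        (l1.foldl (fun d c => d.insert c (d.getD c 0 + 1))
          (PySem.Dict.empty : PySem.Dict Char Int))).getD x 0
      = (l1.count x : Int) - (l2.count x : Int) := by
    intro x
    rw [pv_getD_foldl_insert_sub_one, PySem.Dict.getD_foldl_insert_add_one]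
    simp [PySem.Dict.getD, PySem.Dict.get?, PySem.Dict.empty]
  -- B-side keys
  have hkeys : (l2.foldl (fun d c => d.insert c (d.getD c 0 - 1))
        (l1.foldl (fun d c => d.insert c (d.getD c 0 + 1))
          (PySem.Dict.empty : PySem.Dict Char Int))).keys
      = PySem.Set.update (PySem.Set.update [] l1) l2 := by
    rw [PySem.Dict.keys_foldl_insert, PySem.Dict.keys_foldl_insert]
    rfl
  have hknd : (l2.foldl (fun d c => d.insert c (d.getD c 0 - 1))
        (l1.foldl (fun d c => d.insert c (d.getD c 0 + 1))
          (PySem.Dict.empty : PySem.Dict Char Int))).keys.Nodup := by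
    apply PySem.Dict.nodup_keys_foldl_insert
    apply PySem.Dict.nodup_keys_foldl_insert
    simp [PySem.Dict.keys, PySem.Dict.empty]
  -- rewrite both sides as sums of maps over nodup lists
  rw [pv_values_mapdict _ _ hn1, pv_values_mapdict _ _ hn2,
    PySem.Dict.values_eq_map_keys _ hknd 0, hkeys]
  have hmin : (fun c => min
      (((PySem.Set.ofList l1).foldl
        (fun d c => d.insert c ((PySem.Chars.count l1 [c] : Nat) : Int)) PySem.Dict.empty).getD c 0)
      (((PySem.Set.ofList l2).foldl
        (fun d c => d.insert c ((PySem.Chars.count l2 [c] : Nat) : Int)) PySem.Dict.empty).getD c 0))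
      = fun c => min ((l1.count c : Int)) ((l2.count c : Int)) := by
    funext c; rw [hF, hG]
  rw [hmin]
  have pv_hc1 : (fun c => ((PySem.Chars.count l1 [c] : Nat) : Int)) = fun c => ((l1.count c : Nat) : Int) := by
    funext c; rw [pv_count_single]
  have pv_hc2 : (fun c => ((PySem.Chars.count l2 [c] : Nat) : Int)) = fun c => ((l2.count c : Nat) : Int) := by
    funext c; rw [pv_count_single]
  rw [pv_hc1, pv_hc2, List.map_map]
  have hB : ((fun v => |v|) ∘ fun k => (l2.foldl (fun d c => d.insert c (d.getD c 0 - 1))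
        (l1.foldl (fun d c => d.insert c (d.getD c 0 + 1))
          (PySem.Dict.empty : PySem.Dict Char Int))).getD k 0)
      = fun k => |(l1.count k : Int) - (l2.count k : Int)| := by
    funext k; simp only [Function.comp_apply, hD k]
  rw [hB]
  have hU : (PySem.Set.union (PySem.Set.ofList l1) (PySem.Set.ofList l2)).Nodup :=
    PySem.Set.nodup_union _ _ hn1
  have hK : (PySem.Set.update (PySem.Set.update [] l1) l2).Nodup :=
    PySem.Set.nodup_update _ _ (PySem.Set.nodup_update _ _ List.nodup_nil)
  rw [← List.sum_toFinset _ hn1, ← List.sum_toFinset _ hn2, ← List.sum_toFinset _ hU,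
    ← List.sum_toFinset _ hK]
  have hT1 : (PySem.Set.ofList l1).toFinset = l1.toFinset := by
    ext x; simp [PySem.Set.mem_ofList]
  have hT2 : (PySem.Set.ofList l2).toFinset = l2.toFinset := by
    ext x; simp [PySem.Set.mem_ofList]
  have hTU : (PySem.Set.union (PySem.Set.ofList l1) (PySem.Set.ofList l2)).toFinset
      = l1.toFinset ∪ l2.toFinset := by
    ext x; simp [PySem.Set.mem_union, PySem.Set.mem_ofList]
  have hTK : (PySem.Set.update (PySem.Set.update [] l1) l2).toFinset
      = l1.toFinset ∪ l2.toFinset := by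
    ext x; simp [PySem.Set.mem_update]
  rw [hT1, hT2, hTU, hTK]
  have hext1 : (∑ x ∈ l1.toFinset, ((l1.count x : Nat) : Int))
      = ∑ x ∈ l1.toFinset ∪ l2.toFinset, ((l1.count x : Nat) : Int) := by
    apply Finset.sum_subset Finset.subset_union_left
    intro x _ hx
    rw [List.count_eq_zero_of_not_mem (by simpa using hx)]; rfl
  have hext2 : (∑ x ∈ l2.toFinset, ((l2.count x : Nat) : Int))
      = ∑ x ∈ l1.toFinset ∪ l2.toFinset, ((l2.count x : Nat) : Int) := by
    apply Finset.sum_subset Finset.subset_union_right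
    intro x _ hx
    rw [List.count_eq_zero_of_not_mem (by simpa using hx)]; rfl
  rw [hext1, hext2, Finset.mul_sum, ← Finset.sum_add_distrib, ← Finset.sum_sub_distrib]
  exact Finset.sum_congr rfl (fun x _ => pv_abs_eq _ _)

-- ===== VERDICT (by name: the statement is the Claim_ definition above) =====
theorem flames_count_spec : Claim_equal_flames_count := by
  intro name1 name2 _
  unfold Spec_flames_count flames_count flames_count_alt
  exact pv_main _ _
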